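-- pv_equiv track=rewrite | github.com/jjjen23/Programmers | 프로그래머스/2/60057. 문자열 압축/문자열 압축.py | solution
-- ===== SOURCE A (Python) =====
-- def solution(s):
--     answer = 0
--
--     # 문자가 연속해서 반복되는 만큼 숫자로 압축해서 표현, 1은 생략
--     # 연속되는 단위는 조절가능 -> 단어로 압축하는 개념
--     # 1개 이상 단위로 문자열을 잘라 압축하여 표현한 문자열중 가장 짧은 것의 길이를 반환하도록
--
--     if len(s) == 1:
--         return 1
--
--     resset = set()
--
--     for i in range(1,len(s)):
--         prev = ''
--         temstr = ''
--         cnt = 1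
--
--         for j in range(0,len(s),i):
--             if prev == ''.join(s[j:j+i]):
--                 cnt += 1
--             else:
--                 if cnt > 1:
--                     temstr += (str(cnt) + prev)
--                     cnt = 1
--                 else:
--                     temstr += prev
--             prev = ''.join(s[j:j+i])
--             # cnt = 1
--         if cnt > 1:
--             temstr += (str(cnt)+prev)
--         else:
--             temstr += prev
--         resset.add(len(temstr))
--
--     answer = min(resset)
--
--
--     return answer
-- ===== SOURCE B (Python) =====
-- def solution(s):
--     n = len(s)
--     best = n  # chunk sizes above n//2 never compress, so they all give length n
--     for d in range(1, n // 2 + 1):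
--         # ext[j] = longest m with s[j:j+m] == s[j+d:j+d+m], by backward DP;
--         # a pair of adjacent full blocks at j, j+d is equal iff ext[j] >= d
--         ext = [0] * (n - d + 1)
--         for j in range(n - d - 1, -1, -1):
--             if s[j] == s[j + d]:
--                 ext[j] = ext[j + 1] + 1
--         last = ((n - 1) // d) * d  # start of the final block
--         total, run = 0, 1
--         for j in range(0, last, d):
--             if j + 2 * d <= n and ext[j] >= d:
--                 run += 1
--             else:
--                 total += d + (len(str(run)) if run > 1 else 0)
--                 run = 1
--         total += (n - last) + (len(str(run)) if run > 1 else 0)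
--         best = min(best, total)
--     return best
-- ===== Notes on version B (the rewrite author's own statement) =====
-- stated objective: alternative
-- what changed: B never slices chunks or builds compressed strings: per chunk size it precomputes a backward match-extension DP array (ext[j] = longest m with s[j:j+m]==s[j+d:j+d+m]) so adjacent-block equality is a single O(1) array test, accumulates the compressed length arithmetically, and skips sizes above n//2 which can never compress.
-- outside the precondition, e.g. on solution(''): A raises ValueError, B returns 0
import Mathlib
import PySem

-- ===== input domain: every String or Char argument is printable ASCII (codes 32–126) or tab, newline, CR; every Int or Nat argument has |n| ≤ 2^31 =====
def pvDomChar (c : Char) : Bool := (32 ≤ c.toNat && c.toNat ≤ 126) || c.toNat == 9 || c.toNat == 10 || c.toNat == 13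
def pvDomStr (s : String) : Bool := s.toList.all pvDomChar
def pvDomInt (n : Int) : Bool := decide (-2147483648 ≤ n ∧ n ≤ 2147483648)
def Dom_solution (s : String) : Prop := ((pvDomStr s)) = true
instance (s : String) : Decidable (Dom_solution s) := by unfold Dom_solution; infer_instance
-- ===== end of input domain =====

-- B replaces A's chunk slicing, string building and length set: per chunk size it precomputes a
-- backward match-extension DP array giving O(1) equality tests of adjacent blocks, accumulates the
-- compressed length arithmetically, and skips sizes above n//2 (they can never compress).

-- ===== PORT A =====
-- inner-loop body: chunk = ''.join(s[j:j+i]); compare with prev, extend temstr, update cnt, prev = chunk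
def aStep (cs : List Char) (i : Int) (st : List Char × List Char × Int) (j : Int) :
    List Char × List Char × Int :=
  let chunk := PySem.List.slice cs (some j) (some (j + i))
  if st.1 == chunk then (chunk, st.2.1, st.2.2 + 1)
  else if st.2.2 > 1 then (chunk, st.2.1 ++ PySem.Int.toChars st.2.2 ++ st.1, 1)
  else (chunk, st.2.1 ++ st.1, st.2.2)

-- one iteration of the outer loop: run the inner loop, flush the last run, take len(temstr)
def aCompressLen (cs : List Char) (i : Int) : Int :=
  let st := (PySem.List.pyRange 0 (cs.length : Int) i).foldl (aStep cs i) ([], [], 1)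
  let tem := if st.2.2 > 1 then st.2.1 ++ PySem.Int.toChars st.2.2 ++ st.1 else st.2.1 ++ st.1
  (tem.length : Int)

def solution (s : String) : Int :=
  let cs := s.toList
  if cs.length == 1 then 1
  else
    let resset : PySem.Set Int :=
      (PySem.List.pyRange 1 (cs.length : Int) 1).foldl
        (fun rs i => PySem.Set.add rs (aCompressLen cs i)) PySem.Set.empty
    -- min() raises ValueError on the empty set (only s = "", excluded by Pre_solution);
    -- the .getD 0 default is unreachable under Pre_solution
    (PySem.List.min? resset (fun x => x)).getD 0

-- ===== PORT B =====
-- the backward loop filling ext: ext[j] = ext[j+1]+1 if s[j]==s[j+d] else 0, built back-to-front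
def bExtFrom (cs : List Char) (d : Nat) (j : Nat) : List Nat :=
  if j < cs.length - d then
    (if cs[j]? == cs[j + d]? then (bExtFrom cs d (j + 1)).headD 0 + 1 else 0)
      :: bExtFrom cs d (j + 1)
  else [0]
termination_by cs.length - d - j

-- run-loop body: adjacent full blocks at j, j+d are equal iff j+2d<=n and ext[j]>=d
def bRunStep (n d : Int) (ext : List Nat) (tr : Int × Int) (j : Int) : Int × Int :=
  -- j ≥ 0 always (it comes from range(0, last, d)), so plain Nat indexing matches Python's ext[j]
  if j + 2 * d ≤ n ∧ (d : Int) ≤ ((ext.getD j.toNat 0 : Nat) : Int) then (tr.1, tr.2 + 1)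
  else (tr.1 + d + (if tr.2 > 1 then ((PySem.Int.toChars tr.2).length : Int) else 0), 1)

def bCompressLen (cs : List Char) (d : Int) : Int :=
  let n : Int := cs.length
  let ext := bExtFrom cs d.toNat 0
  let last := PySem.Int.floordiv (n - 1) d * d
  let tr := (PySem.List.pyRange 0 last d).foldl (bRunStep n d ext) (0, 1)
  tr.1 + (n - last) + (if tr.2 > 1 then ((PySem.Int.toChars tr.2).length : Int) else 0)

def solution_alt (s : String) : Int :=
  let cs := s.toList
  (PySem.List.pyRange 1 (PySem.Int.floordiv (cs.length : Int) 2 + 1) 1).foldl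
    (fun best d => min best (bCompressLen cs d)) (cs.length : Int)

-- ===== PRECONDITION & SPEC =====
-- Pre_ excludes only s = "", where A raises ValueError (min() of an empty set); B returns 0 there
def Pre_solution (s : String) : Prop := s ≠ ""
instance (s : String) : Decidable (Pre_solution s) := by unfold Pre_solution; infer_instance
def pvWitness_solution : String := "aab"

def Spec_solution (s : String) (out : Int) : Prop := out = solution_alt s
instance (s : String) (out : Int) : Decidable (Spec_solution s out) := by unfold Spec_solution; infer_instance

-- ===== CLAIM (what is proved, stated in full; the proofs are below) =====
def Claim_equal_solution : Prop := ∀ (s : String), Dom_solution s → Pre_solution s → Spec_solution s (solution s)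

-- ===== LEMMAS AND PROOFS =====

-- A's inner-loop body as a function of the current chunk (aStep cs i st j = gStep st (chunk at j))
def gStep (st : List Char × List Char × Int) (c : List Char) : List Char × List Char × Int :=
  if st.1 == c then (c, st.2.1, st.2.2 + 1)
  else if st.2.2 > 1 then (c, st.2.1 ++ PySem.Int.toChars st.2.2 ++ st.1, 1)
  else (c, st.2.1 ++ st.1, st.2.2)

-- proof-side intermediate form of the per-size compressed length: fold over adjacent chunk pairs
def mChunks (cs : List Char) (size : Int) : List (List Char) :=
  (PySem.List.pyRange 0 (cs.length : Int) size).map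
    (fun k => PySem.List.slice cs (some k) (some (k + size)))

def mStep (tr : Int × Int) (pc : List Char × List Char) : Int × Int :=
  if pc.1 == pc.2 then (tr.1, tr.2 + 1)
  else (tr.1 + (pc.1.length : Int) + (if tr.2 > 1 then ((PySem.Int.toChars tr.2).length : Int) else 0), 1)

def mCompressLen (cs : List Char) (size : Int) : Int :=
  let chunks := mChunks cs size
  let tr := (chunks.zip chunks.tail).foldl mStep (0, 1)
  tr.1 + (((PySem.List.pyGet? chunks (-1)).getD []).length : Int)
    + (if tr.2 > 1 then ((PySem.Int.toChars tr.2).length : Int) else 0)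

theorem pyGet?_neg_one {α : Type} (x : α) (t : List α) :
    (PySem.List.pyGet? (x :: t) (-1)) = (x :: t).getLast? := by
  simp only [PySem.List.pyGet?, PySem.List.pyIdx?]
  rw [if_neg (by norm_num), if_pos (by simp only [List.length_cons]; push_cast; omega)]
  simp [List.getLast?_eq_getElem?]

-- the joint invariant of A's string-building loop and the chunk-pair length-counting loop
theorem loopEq : ∀ (rest : List (List Char)) (prev tem : List Char) (cnt total : Int),
    total = (tem.length : Int) → 1 ≤ cnt →
    (((let st := rest.foldl gStep (prev, tem, cnt);
       (if st.2.2 > 1 then st.2.1 ++ PySem.Int.toChars st.2.2 ++ st.1 else st.2.1 ++ st.1).length) : Nat) : Int)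
    = (let tr := ((prev :: rest).zip rest).foldl mStep (total, cnt);
       tr.1 + ((((prev :: rest).getLast?).getD []).length : Int)
         + (if tr.2 > 1 then ((PySem.Int.toChars tr.2).length : Int) else 0)) := by
  intro rest
  induction rest with
  | nil =>
      intro prev tem cnt total ht hc
      simp only [List.foldl_nil, List.zip_nil_right, List.getLast?_singleton, Option.getD_some]
      by_cases h : cnt > 1
      · simp [h, ht]; ring
      · simp [h, ht]
  | cons c rest' ih =>
      intro prev tem cnt total ht hc
      simp only [List.foldl_cons, List.zip_cons_cons, List.getLast?_cons_cons]
      by_cases hpc : prev = c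
      · subst hpc
        rw [show gStep (prev, tem, cnt) prev = (prev, tem, cnt + 1) by simp [gStep],
            show mStep (total, cnt) (prev, prev) = (total, cnt + 1) by simp [mStep]]
        exact ih prev tem (cnt + 1) total ht (by omega)
      · have hbeq : (prev == c) = false := by simp [hpc]
        by_cases hc1 : cnt > 1
        · rw [show gStep (prev, tem, cnt) c = (c, tem ++ PySem.Int.toChars cnt ++ prev, 1) by
                simp [gStep, hbeq, hc1],
              show mStep (total, cnt) (prev, c)
                  = (total + (prev.length : Int) + ((PySem.Int.toChars cnt).length : Int), 1) by
                simp [mStep, hbeq, hc1]]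
          rw [ih c (tem ++ PySem.Int.toChars cnt ++ prev) 1
                (total + (prev.length : Int) + ((PySem.Int.toChars cnt).length : Int))
                (by simp [ht]; ring) (by omega)]
        · have hcnt : cnt = 1 := by omega
          subst hcnt
          rw [show gStep (prev, tem, 1) c = (c, tem ++ prev, 1) by simp [gStep, hbeq],
              show mStep (total, 1) (prev, c) = (total + (prev.length : Int), 1) by
                simp [mStep, hbeq]]
          have := ih c (tem ++ prev) 1 (total + (prev.length : Int))
                (by simp [ht]) (by omega)
          simpa using this

-- per-chunk-size equality of A's compressed length and the intermediate form
theorem perI (cs : List Char) (i : Int) (hcs : cs ≠ []) (hi : 1 ≤ i) :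
    aCompressLen cs i = mCompressLen cs i := by
  have hn : 0 < (cs.length : Int) := by
    have : cs.length ≠ 0 := by simpa using hcs
    omega
  have hi0 : 0 < i := by omega
  have hone : (1:Int) ≤ ((cs.length : Int) - 0 + i - 1) / i := by
    rw [← PySem.Int.floordiv_eq_ediv_of_pos hi0, PySem.Int.le_floordiv_iff_mul_le hi0]
    omega
  have hcount : (((cs.length : Int) - 0 + i - 1) / i).toNat ≠ 0 := by omega
  obtain ⟨m, hm⟩ := Nat.exists_eq_succ_of_ne_zero hcount
  have hchunks : mChunks cs i
      = PySem.List.slice cs (some 0) (some (0 + i))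
        :: ((List.range m).map (fun k => k + 1)).map
             (fun (k : Nat) => PySem.List.slice cs (some ((0:Int) + i * (k:Int)))
               (some ((0:Int) + i * (k:Int) + i))) := by
    unfold mChunks
    rw [PySem.List.pyRange_of_pos _ _ hi0, if_pos (by omega), hm, List.range_succ_eq_map]
    simp [List.map_map, Function.comp]
  have hc0 : PySem.List.slice cs (some (0:Int)) (some ((0:Int) + i)) = cs.take i.toNat := by
    rw [show ((0:Int) + i) = ((i.toNat : ℕ) : ℤ) by omega, show (0:Int) = ((0:ℕ):ℤ) from rfl,
        PySem.List.slice_natCast]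
    simp
  have hc0ne : PySem.List.slice cs (some (0:Int)) (some ((0:Int) + i)) ≠ [] := by
    rw [hc0]
    simp [List.take_eq_nil_iff]
    constructor
    · omega
    · exact hcs
  unfold aCompressLen mCompressLen
  rw [show aStep cs i = (fun st j => gStep st (PySem.List.slice cs (some j) (some (j + i)))) from rfl,
      ← List.foldl_map,
      show ((PySem.List.pyRange 0 (cs.length : Int) i).map
        (fun j => PySem.List.slice cs (some j) (some (j + i)))) = mChunks cs i from rfl,
      hchunks]
  simp only [List.foldl_cons, List.tail_cons]
  rw [pyGet?_neg_one,
      show gStep ([], [], 1) (PySem.List.slice cs (some (0:Int)) (some ((0:Int) + i)))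
        = (PySem.List.slice cs (some (0:Int)) (some ((0:Int) + i)), ([]:List Char), (1:Int)) by
      simp [gStep]
      intro h
      exact absurd h.symm (by simpa using hc0ne)]
  exact loopEq _ _ [] 1 0 (by simp) (by omega)

-- sizes that leave at most two chunks cannot compress: the length is n
theorem bigI (cs : List Char) (i : Int) (hcs : cs ≠ [])
    (h2 : (cs.length : Int) < 2 * i) (hin : i < (cs.length : Int)) :
    mCompressLen cs i = (cs.length : Int) := by
  have hn1 : 1 ≤ (cs.length : Int) := by
    have : cs.length ≠ 0 := by simpa using hcs
    omega
  have hi0 : (0:Int) < i := by omega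
  have hcount : (((cs.length : Int) - 0 + i - 1) / i).toNat = 2 := by
    have hfd : PySem.Int.floordiv ((cs.length : Int) - 0 + i - 1) i = 2 := by
      rw [PySem.Int.floordiv_eq_iff_of_pos hi0]
      constructor <;> omega
    rw [PySem.Int.floordiv_eq_ediv_of_pos hi0] at hfd
    omega
  have hchunks : mChunks cs i = [PySem.List.slice cs (some 0) (some (0 + i)),
      PySem.List.slice cs (some (0 + i * 1)) (some (0 + i * 1 + i))] := by
    unfold mChunks
    rw [PySem.List.pyRange_of_pos _ _ hi0, if_pos (by omega), hcount,
        show List.range 2 = [0, 1] from rfl]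
    simp
  have hc0 : PySem.List.slice cs (some (0:Int)) (some ((0:Int) + i)) = cs.take i.toNat := by
    rw [show ((0:Int) + i) = ((i.toNat : ℕ) : ℤ) by omega, show (0:Int) = ((0:ℕ):ℤ) from rfl,
        PySem.List.slice_natCast]
    simp
  have hc1 : PySem.List.slice cs (some ((0:Int) + i * 1)) (some ((0:Int) + i * 1 + i))
      = cs.drop i.toNat := by
    rw [show ((0:Int) + i * 1 + i) = (((i.toNat + i.toNat) : ℕ) : ℤ) by push_cast; omega,
        show ((0:Int) + i * 1) = ((i.toNat : ℕ) : ℤ) by omega,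
        PySem.List.slice_natCast,
        show i.toNat + i.toNat - i.toNat = i.toNat by omega]
    apply List.take_of_length_le
    simp
    omega
  have hne : ((cs.take i.toNat : List Char) == cs.drop i.toNat) = false := by
    simp only [beq_eq_false_iff_ne, ne_eq]
    intro h
    have hl := congrArg List.length h
    simp at hl
    omega
  unfold mCompressLen
  rw [hchunks, hc0, hc1]
  simp only [List.tail_cons, List.zip_cons_cons, List.zip_nil_right, List.foldl_cons,
    List.foldl_nil, pyGet?_neg_one, List.getLast?_cons_cons, List.getLast?_singleton,
    Option.getD_some]
  rw [show mStep (0, 1) (cs.take i.toNat, cs.drop i.toNat)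
      = ((0:Int) + (cs.take i.toNat).length + 0, 1) by simp [mStep, hne]]
  simp
  omega

-- for a two-character string the only chunk size, 1, gives length 2
theorem twoI (cs : List Char) (h : cs.length = 2) : mCompressLen cs 1 = 2 := by
  obtain ⟨a, b, rfl⟩ := List.length_eq_two.mp h
  have ht2 : ((PySem.Int.toChars (2:Int)).length : Int) = 1 := by decide
  by_cases hab : a = b
  · subst hab
    simp [mCompressLen, mChunks, mStep, PySem.List.pyRange, PySem.List.slice,
      PySem.List.clampIdx, List.range_succ,
      PySem.List.pyGet?, PySem.List.pyIdx?, ht2]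
  · have hne : (([a] : List Char) == [b]) = false := by simp [hab]
    simp [mCompressLen, mChunks, mStep, PySem.List.pyRange, PySem.List.slice,
      PySem.List.clampIdx, List.range_succ,
      PySem.List.pyGet?, PySem.List.pyIdx?, hne]

-- functional reading of the ext array
def extFun (cs : List Char) (d : Nat) (j : Nat) : Nat :=
  if j < cs.length - d then
    (if cs[j]? == cs[j + d]? then extFun cs d (j + 1) + 1 else 0)
  else 0
termination_by cs.length - d - j

theorem extFrom_getD (cs : List Char) (d : Nat) :
    ∀ (m j k : Nat), cs.length - d - j ≤ m →
      (bExtFrom cs d j).getD k 0 = extFun cs d (j + k) := by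
  intro m
  induction m with
  | zero =>
      intro j k h
      rw [bExtFrom, if_neg (by omega), extFun, if_neg (by omega)]
      cases k <;> simp [List.getD]
  | succ m ih =>
      intro j k h
      by_cases hj : j < cs.length - d
      · rw [bExtFrom, if_pos hj]
        cases k with
        | zero =>
            simp only [Nat.add_zero]
            rw [extFun, if_pos hj]
            have hh : (bExtFrom cs d (j + 1)).headD 0 = extFun cs d (j + 1) := by
              have := ih (j + 1) 0 (by omega)
              rw [Nat.add_zero] at this
              rw [← this]
              cases bExtFrom cs d (j + 1) <;> simp [List.getD]
            by_cases he : cs[j]? = cs[j + d]?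
            · rw [if_pos (by simp [he]), if_pos (by simp [he]), hh]
              simp [List.getD]
            · rw [if_neg (by simp [he]), if_neg (by simp [he])]
              simp [List.getD]
        | succ k' =>
            have : (((if cs[j]? == cs[j + d]? then (bExtFrom cs d (j + 1)).headD 0 + 1 else 0)
                :: bExtFrom cs d (j + 1))).getD (k' + 1) 0
                = (bExtFrom cs d (j + 1)).getD k' 0 := by
              simp [List.getD]
            rw [this, ih (j + 1) k' (by omega)]
            congr 1
            omega
      · rw [bExtFrom, if_neg hj, extFun, if_neg (by omega)]
        cases k <;> simp [List.getD]

theorem extFun_ge_iff (cs : List Char) (d : Nat) :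
    ∀ (m j : Nat), (m ≤ extFun cs d j ↔
      ∀ t < m, j + t + d < cs.length ∧ cs[j + t]? = cs[j + t + d]?) := by
  intro m
  induction m with
  | zero => intro j; simp
  | succ m ih =>
      intro j
      rw [extFun]
      by_cases hj : j < cs.length - d
      · by_cases he : cs[j]? = cs[j + d]?
        · rw [if_pos hj, if_pos (by simp [he])]
          constructor
          · intro h t ht
            cases t with
            | zero => exact ⟨by omega, by simpa using he⟩
            | succ t' =>
                have h2 := ((ih (j + 1)).mp (by omega)) t' (by omega)
                rw [show j + 1 + t' = j + (t' + 1) by omega] at h2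
                exact h2
          · intro h
            have hm : m ≤ extFun cs d (j + 1) := by
              apply (ih (j + 1)).mpr
              intro t ht
              have h2 := h (t + 1) (by omega)
              rw [show j + (t + 1) = j + 1 + t by omega] at h2
              exact h2
            omega
        · rw [if_pos hj, if_neg (by simp [he])]
          constructor
          · intro h; omega
          · intro h
            exact absurd (by simpa using (h 0 (by omega)).2) he
      · rw [if_neg hj]
        constructor
        · intro h; omega
        · intro h
          have := (h 0 (by omega)).1
          omega

-- take-of-drop prefixes are equal iff they agree pointwise
theorem takeEq_iff (cs : List Char) (d a b : Nat) :
    ((cs.drop a).take d = (cs.drop b).take d) ↔ ∀ t < d, cs[a + t]? = cs[b + t]? := by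
  constructor
  · intro h t ht
    have h2 := congrArg (fun l => l[t]?) h
    simpa [List.getElem?_take, List.getElem?_drop, ht] using h2
  · intro h
    apply List.ext_getElem?
    intro n
    by_cases hn : n < d
    · simpa [List.getElem?_take, List.getElem?_drop, hn] using h n hn
    · simp [hn]

-- zipping a mapped range with its tail pairs adjacent indices
theorem zip_tail_range' {α : Type} (g : Nat → α) :
    ∀ (c a : Nat), ((List.range' a c).map g).zip (((List.range' a c).map g).tail)
      = (List.range' a (c - 1)).map (fun k => (g k, g (k + 1))) := by
  intro c
  induction c with
  | zero => intro a; simp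
  | succ c ih =>
      intro a
      cases c with
      | zero => simp
      | succ c' =>
          have h1 : List.range' a (c' + 1 + 1) = a :: List.range' (a + 1) (c' + 1) := by
            rw [List.range'_succ]
          have h2 : List.range' (a + 1) (c' + 1) = (a + 1) :: List.range' (a + 2) c' := by
            rw [List.range'_succ]
          have hih := ih (a + 1)
          rw [h2] at hih
          simp only [List.map_cons, List.tail_cons] at hih
          rw [h1]
          simp only [List.map_cons, List.tail_cons]
          rw [h2]
          simp only [List.map_cons, List.zip_cons_cons]
          rw [hih, show c' + 1 + 1 - 1 = c' + 1 from rfl,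
              show c' + 1 - 1 = c' from rfl]
          have h3 : List.range' a (c' + 1) = a :: List.range' (a + 1) c' := by
            rw [List.range'_succ]
          rw [h3]
          simp

theorem zip_tail_map_range {α : Type} (g : Nat → α) (c : Nat) :
    ((List.range c).map g).zip (((List.range c).map g).tail)
      = (List.range (c - 1)).map (fun k => (g k, g (k + 1))) := by
  rw [List.range_eq_range', List.range_eq_range']
  exact zip_tail_range' g c 0

-- the per-size equality: intermediate chunk-pair form = B's ext-array form
theorem mEqB (cs : List Char) (i : Int) (h1 : 1 ≤ i) (h2 : 2 * i ≤ (cs.length : Int)) :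
    mCompressLen cs i = bCompressLen cs i := by
  obtain ⟨d, rfl⟩ : ∃ d : Nat, i = (d : Int) := ⟨i.toNat, by omega⟩
  have hd1 : 1 ≤ d := by exact_mod_cast h1
  have hdL : 2 * d ≤ cs.length := by exact_mod_cast h2
  set L := cs.length with hL
  set q := (L - 1) / d with hq
  have hd0 : 0 < d := hd1
  have hdm := Nat.div_add_mod (L - 1) d
  have hmod : (L - 1) % d < d := Nat.mod_lt _ hd0
  have hlast_le : q * d ≤ L - 1 := by rw [hq, mul_comm]; omega
  have hlast_ge : L - d ≤ q * d := by rw [hq, mul_comm]; omega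
  have hq1 : 1 ≤ q := by
    rw [hq]
    exact (Nat.one_le_div_iff hd0).mpr (by omega)
  have hd0' : (0:Int) < (d:Int) := by exact_mod_cast hd0
  have hcA : ((((L:Nat):Int) - 0 + (d:Int) - 1) / (d:Int)).toNat = q + 1 := by
    have hnat : (L - 1 + d) / d = q + 1 := by rw [Nat.add_div_right _ hd0, hq]
    rw [show (((L:Nat):Int) - 0 + (d:Int) - 1) = ((L - 1 + d : Nat) : Int) by push_cast; omega,
        ← PySem.Int.floordiv_eq_ediv_of_pos hd0', PySem.Int.floordiv_natCast, hnat,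
        Int.toNat_natCast]
  have hlastI : PySem.Int.floordiv (((L:Nat):Int) - 1) (d:Int) * (d:Int) = ((q * d : Nat) : Int) := by
    rw [show (((L:Nat):Int) - 1) = ((L - 1 : Nat) : Int) by omega,
        PySem.Int.floordiv_natCast]
    rw [← hq]
    push_cast
    ring
  have hcB : ((((q * d : Nat):Int) - 0 + (d:Int) - 1) / (d:Int)).toNat = q := by
    have hnat : (d - 1 + q * d) / d = q := by
      rw [Nat.add_mul_div_right _ _ hd0, Nat.div_eq_of_lt (by omega)]
      omega
    rw [show ((((q * d : Nat)):Int) - 0 + (d:Int) - 1) = ((d - 1 + q * d : Nat) : Int) by push_cast; omega,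
        ← PySem.Int.floordiv_eq_ediv_of_pos hd0', PySem.Int.floordiv_natCast, hnat,
        Int.toNat_natCast]
  set G : Nat → List Char := fun k => (cs.drop (d * k)).take d with hG
  have hslice : ∀ k : Nat, PySem.List.slice cs (some ((0:Int) + (d:Int) * (k:Nat)))
      (some ((0:Int) + (d:Int) * (k:Nat) + (d:Int))) = G k := by
    intro k
    rw [show ((0:Int) + (d:Int) * (k:Nat)) = ((d * k : Nat) : Int) by push_cast; ring]
    exact PySem.List.slice_natCast_add cs (d * k) d
  have hchunks : mChunks cs (d:Int) = (List.range (q + 1)).map G := by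
    unfold mChunks
    rw [show ((cs.length : Nat) : Int) = ((L:Nat):Int) from rfl,
        PySem.List.pyRange_of_pos _ _ hd0',
        if_pos (show (0:Int) < ((L:Nat):Int) by exact_mod_cast Nat.lt_of_lt_of_le Nat.zero_lt_one (by omega)),
        hcA, List.map_map]
    exact List.map_congr_left (fun k _ => hslice k)
  have hrangeB : PySem.List.pyRange 0 ((q * d : Nat):Int) (d:Int)
      = (List.range q).map (fun k : Nat => (0:Int) + (d:Int) * (k:Nat)) := by
    rw [PySem.List.pyRange_of_pos _ _ hd0',
        if_pos (show (0:Int) < ((q * d : Nat):Int) by exact_mod_cast Nat.mul_pos (by omega) hd0),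
        hcB]
  have hext : ∀ k : Nat, (bExtFrom cs d 0).getD k 0 = extFun cs d k := by
    intro k
    simpa using extFrom_getD cs d cs.length 0 k (by omega)
  have hstep : ∀ (tr : Int × Int) (k : Nat), k ∈ List.range q →
      mStep tr (G k, G (k + 1)) = bRunStep ((L:Nat):Int) (d:Int) (bExtFrom cs d 0) tr ((0:Int) + (d:Int) * (k:Nat)) := by
    intro tr k hk
    rw [List.mem_range] at hk
    have hkd : d * k + d ≤ q * d := by
      calc d * k + d = d * (k + 1) := by ring
        _ ≤ d * q := Nat.mul_le_mul_left d hk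
        _ = q * d := mul_comm d q
    have hjL : d * k + d < L := by omega
    have hlenGk : (G k).length = d := by
      simp only [hG, List.length_take, List.length_drop]
      omega
    have hidx : ((0:Int) + (d:Int) * (k:Nat)).toNat = d * k := by
      rw [show ((0:Int) + (d:Int) * (k:Nat)) = ((d * k : Nat) : Int) by push_cast; ring]
      exact Int.toNat_natCast _
    unfold mStep bRunStep
    dsimp only
    rw [hidx, hext (d * k)]
    by_cases hc : d * k + 2 * d ≤ L
    · by_cases heq : G k = G (k + 1)
      · have hpt : ∀ t < d, cs[d * k + t]? = cs[d * k + d + t]? := by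
          intro t ht
          have h3 := (takeEq_iff cs d (d * k) (d * (k + 1))).mp heq t ht
          rw [show d * (k + 1) = d * k + d by ring] at h3
          exact h3
        have hge : d ≤ extFun cs d (d * k) := by
          apply (extFun_ge_iff cs d d (d * k)).mpr
          intro t ht
          exact ⟨by omega, by rw [show d * k + t + d = d * k + d + t by omega]; exact hpt t ht⟩
        have hc2 : (0:Int) + (d:Int) * (k:Nat) + 2 * (d:Int) ≤ ((L:Nat):Int) ∧
            ((d:Int)) ≤ ((extFun cs d (d * k) : Nat) : Int) :=
          ⟨by omega, by exact_mod_cast hge⟩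
        rw [if_pos (show (G k == G (k + 1)) = true by simp [heq]), if_pos hc2]
      · have hlt : ¬ (d ≤ extFun cs d (d * k)) := by
          intro hge
          apply heq
          apply (takeEq_iff cs d (d * k) (d * (k + 1))).mpr
          intro t ht
          have h3 := ((extFun_ge_iff cs d d (d * k)).mp hge t ht).2
          rw [show d * k + t + d = d * k + d + t by omega,
              ← show d * (k + 1) = d * k + d by ring] at h3
          exact h3
        have hnc : ¬ ((0:Int) + (d:Int) * (k:Nat) + 2 * (d:Int) ≤ ((L:Nat):Int) ∧
            ((d:Int)) ≤ ((extFun cs d (d * k) : Nat) : Int)) := by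
          intro hcond
          exact hlt (by exact_mod_cast hcond.2)
        rw [if_neg (show ¬ (G k == G (k + 1)) = true by simp [heq]), if_neg hnc, hlenGk]
    · have hlen2 : (G (k + 1)).length < d := by
        simp only [hG, List.length_take, List.length_drop]
        rw [show d * (k + 1) = d * k + d by ring]
        omega
      have hneq : G k ≠ G (k + 1) := by
        intro h
        rw [← h, hlenGk] at hlen2
        omega
      have hnc : ¬ ((0:Int) + (d:Int) * (k:Nat) + 2 * (d:Int) ≤ ((L:Nat):Int) ∧
          ((d:Int)) ≤ ((extFun cs d (d * k) : Nat) : Int)) := by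
        intro hcond
        have h4 := hcond.1
        push_cast at h4
        omega
      rw [if_neg (show ¬ (G k == G (k + 1)) = true by simp [hneq]), if_neg hnc, hlenGk]
  have hlastchunk : PySem.List.pyGet? ((List.range (q + 1)).map G) (-1) = some (G q) := by
    have hcons : (List.range (q + 1)).map G
        = G 0 :: ((List.range q).map Nat.succ).map G := by
      rw [List.range_succ_eq_map]
      simp
    rw [hcons, pyGet?_neg_one, ← hcons, List.getLast?_map, List.range_succ,
        List.getLast?_concat]
    rfl
  have hlenGq : ((G q).length : Int) = ((L:Nat):Int) - ((q * d : Nat):Int) := by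
    have h6 : (G q).length = L - q * d := by
      simp only [hG, List.length_take, List.length_drop, Nat.mul_comm d q]
      omega
    rw [h6]
    omega
  unfold mCompressLen bCompressLen
  dsimp only
  rw [Int.toNat_natCast, hlastI, hchunks, hrangeB,
      zip_tail_map_range G (q + 1), show q + 1 - 1 = q from rfl,
      List.foldl_map, List.foldl_map,
      PySem.List.foldl_congr_mem _ _ _ _ (fun tr k hk => hstep tr k hk),
      hlastchunk]
  simp only [Option.getD_some]
  rw [hlenGq]

-- ===== VERDICT (by name: the statement is the Claim_ definition above) =====
theorem solution_spec : Claim_equal_solution := by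
  intro s _hdom hpre
  unfold Spec_solution solution solution_alt
  dsimp only
  have hcs : s.toList ≠ [] := by
    intro h
    exact hpre (by rwa [← String.toList_eq_nil_iff])
  by_cases h1 : s.toList.length = 1
  · rw [h1]
    norm_num
  · have hn2 : 2 ≤ s.toList.length := by
      have : s.toList.length ≠ 0 := by simpa using hcs
      omega
    set cs := s.toList with hcsdef
    set n := cs.length with hndef
    set fA := aCompressLen cs with hfA
    set fB := bCompressLen cs with hfB
    set vals := (PySem.List.pyRange 1 (n : Int) 1).map fA with hvals
    have hset : (PySem.List.pyRange 1 (n : Int) 1).foldl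
        (fun rs i => PySem.Set.add rs (fA i)) PySem.Set.empty = PySem.Set.ofList vals := by
      rw [PySem.Set.ofList_eq_foldl, List.foldl_map]
      rfl
    have hvne : vals ≠ [] := by
      have h1m : (1 : Int) ∈ PySem.List.pyRange 1 (n : Int) 1 := by
        rw [PySem.List.mem_pyRange_one]
        omega
      simp [hvals]
      intro h
      rw [h] at h1m
      simp at h1m
    have hsome : ∃ m, PySem.List.min? (PySem.Set.ofList vals) (fun x => x) = some m := by
      rcases hopt : PySem.List.min? (PySem.Set.ofList vals) (fun x => x) with _ | m
      · exfalso
        rw [PySem.List.min?_eq_none_iff] at hopt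
        obtain ⟨v, hv⟩ := List.exists_mem_of_ne_nil vals hvne
        have hv2 : v ∈ PySem.Set.ofList vals := (PySem.Set.mem_ofList vals v).2 hv
        rw [hopt] at hv2
        simp at hv2
      · exact ⟨m, rfl⟩
    obtain ⟨m, hm⟩ := hsome
    have hmem : m ∈ vals := (PySem.Set.mem_ofList vals m).1 (PySem.List.min?_mem hm)
    have hmin : ∀ y ∈ vals, m ≤ y := by
      intro y hy
      exact PySem.List.min?_isMin hm y ((PySem.Set.mem_ofList vals y).2 hy)
    rw [if_neg (by simpa using h1), hset, hm]
    simp only [Option.getD_some]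
    -- B side as a fold of min over the mapped list
    rw [show (fun (best size : Int) => min best (fB size))
          = (fun (x : Int) (y : Int) => min x (fB y)) from rfl, ← List.foldl_map]
    have hfd : PySem.Int.floordiv (n : Int) 2 = ((n / 2 : ℕ) : ℤ) := by
      exact_mod_cast PySem.Int.floordiv_natCast n 2
    set R2 := PySem.List.pyRange 1 (PySem.Int.floordiv (n : Int) 2 + 1) 1 with hR2
    have hmemR2 : ∀ j : Int, j ∈ R2 ↔ 1 ≤ j ∧ j < ((n / 2 : ℕ) : ℤ) + 1 := by
      intro j
      rw [hR2, hfd, PySem.List.mem_pyRange_one]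
    obtain ⟨hrn, hrle⟩ := PySem.List.foldl_min_le (R2.map fB) ((n : ℕ) : ℤ)
    -- A's value equals B's on small sizes, and is n on large sizes
    have hsmallEq : ∀ j : Int, 1 ≤ j → 2 * j ≤ (n : Int) → fA j = fB j := by
      intro j hj hj2
      rw [hfA, hfB, perI cs j hcs hj, mEqB cs j hj hj2]
    have hmler : m ≤ List.foldl min ((n : ℕ) : ℤ) (R2.map fB) := by
      rcases PySem.List.foldl_min_mem (R2.map fB) ((n : ℕ) : ℤ) with hcase | hcase
      · rw [hcase]
        rcases Nat.lt_or_ge n 3 with hn3 | hn3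
        · have hn2' : n = 2 := by omega
          have h1R : (1 : Int) ∈ PySem.List.pyRange 1 (n : Int) 1 := by
            rw [PySem.List.mem_pyRange_one]; omega
          have := hmin (fA 1) (List.mem_map_of_mem h1R)
          rw [hfA, perI cs 1 hcs (by omega), twoI cs hn2'] at this
          omega
        · have hjR : ((n : Int) - 1) ∈ PySem.List.pyRange 1 (n : Int) 1 := by
            rw [PySem.List.mem_pyRange_one]; omega
          have := hmin (fA ((n : Int) - 1)) (List.mem_map_of_mem hjR)
          rw [hfA, perI cs _ hcs (by omega),
              bigI cs ((n : Int) - 1) hcs (by omega) (by omega)] at this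
          omega
      · obtain ⟨j, hjR2, hjeq⟩ := List.mem_map.1 hcase
        have hj := (hmemR2 j).1 hjR2
        have hjR1 : j ∈ PySem.List.pyRange 1 (n : Int) 1 := by
          rw [PySem.List.mem_pyRange_one]
          have : n / 2 < n := by omega
          omega
        have := hmin (fA j) (List.mem_map_of_mem hjR1)
        rw [hsmallEq j (by omega) (by omega)] at this
        omega
    have hrlem : List.foldl min ((n : ℕ) : ℤ) (R2.map fB) ≤ m := by
      obtain ⟨j, hjR1, hjeq⟩ := List.mem_map.1 hmem
      have hj := PySem.List.mem_pyRange_one.1 hjR1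
      rcases lt_or_ge j (((n / 2 : ℕ) : ℤ) + 1) with hsmall | hbig
      · have : fB j ∈ R2.map fB := List.mem_map_of_mem ((hmemR2 j).2 ⟨hj.1, hsmall⟩)
        have h2 := hrle _ this
        rw [← hsmallEq j hj.1 (by omega), hjeq] at h2
        exact h2
      · have hfj : fA j = (n : Int) := by
          rw [hfA, perI cs j hcs hj.1]
          exact bigI cs j hcs (by omega) hj.2
        rw [hjeq] at hfj
        rw [hfj]
        exact hrn
    omega
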